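-- pv_equiv track=rewrite | github.com/douhan-wicht/amphioxus-slr | workflow/scripts/plots/heatmap_plot.py | simplify_anatomy
-- ===== SOURCE A (Python) =====
-- def simplify_anatomy(name):
--     name = name.lower()
--     if 'male' in name:
--         return 'Testis'  # Renaming Male-specific to Testis
--     elif 'nervous' in name:
--         return 'Nervous system'
--     elif 'musculature' in name or 'muscle' in name:
--         return 'Musculature'
--     elif 'digestive' in name or 'gut' in name:
--         return 'Digestive system'
--     elif any(stage in name for stage in ['embryo', 'larva', 'neurula', 'blastula', 'gastrula']):
--         return 'Developmental stage'
--     else: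
--         return 'Other'
-- ===== SOURCE B (Python) =====
-- _CATEGORIES = ['Testis', 'Nervous system', 'Musculature', 'Digestive system',
--                'Developmental stage']
-- _KEYWORD_PRIORITY = [('male', 0), ('nervous', 1), ('musculature', 2), ('muscle', 2),
--                      ('digestive', 3), ('gut', 3), ('embryo', 4), ('larva', 4),
--                      ('neurula', 4), ('blastula', 4), ('gastrula', 4)]
--
-- def simplify_anatomy(name):
--     name = name.lower()
--     hits = [p for k, p in _KEYWORD_PRIORITY if k in name]
--     return _CATEGORIES[min(hits)] if hits else 'Other'
-- ===== Notes on version B (the rewrite author's own statement) =====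
-- stated objective: alternative
-- what changed: Instead of an early-return if-elif chain, B collects the priorities of ALL matching keywords in one comprehension pass and returns the category of the minimum priority (no early exit, order of checks irrelevant).
import Mathlib
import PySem

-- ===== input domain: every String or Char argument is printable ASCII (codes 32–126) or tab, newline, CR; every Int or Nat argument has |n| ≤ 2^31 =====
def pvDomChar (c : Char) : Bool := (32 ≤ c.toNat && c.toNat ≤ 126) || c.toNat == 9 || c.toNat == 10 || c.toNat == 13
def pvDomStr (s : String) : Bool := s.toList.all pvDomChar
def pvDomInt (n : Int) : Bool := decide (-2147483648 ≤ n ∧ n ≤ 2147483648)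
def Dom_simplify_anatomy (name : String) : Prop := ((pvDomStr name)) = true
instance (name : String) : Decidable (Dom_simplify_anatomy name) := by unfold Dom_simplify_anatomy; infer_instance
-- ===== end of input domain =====

-- B collects the priorities of all matching keywords in one pass and returns the category of the minimum priority; alternative decomposition, same cost.


-- ===== PORT A =====
def simplify_anatomy (name : String) : String :=
  let name := PySem.Str.lower name
  if PySem.Str.isIn "male" name then "Testis"
  else if PySem.Str.isIn "nervous" name then "Nervous system"
  else if PySem.Str.isIn "musculature" name || PySem.Str.isIn "muscle" name then "Musculature"
  else if PySem.Str.isIn "digestive" name || PySem.Str.isIn "gut" name then "Digestive system"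
  else if ["embryo", "larva", "neurula", "blastula", "gastrula"].any
      (fun stage => PySem.Str.isIn stage name) then "Developmental stage"
  else "Other"

-- ===== PORT B =====
def pvCategories : List String :=
  ["Testis", "Nervous system", "Musculature", "Digestive system", "Developmental stage"]

def pvKeywordPriority : List (String × Int) :=
  [("male", 0), ("nervous", 1), ("musculature", 2), ("muscle", 2),
   ("digestive", 3), ("gut", 3), ("embryo", 4), ("larva", 4),
   ("neurula", 4), ("blastula", 4), ("gastrula", 4)]

def simplify_anatomy_alt (name : String) : String :=
  let name := PySem.Str.lower name
  -- hits = [p for k, p in _KEYWORD_PRIORITY if k in name]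
  let hits := (pvKeywordPriority.filter (fun kp => PySem.Str.isIn kp.1 name)).map Prod.snd
  -- _CATEGORIES[min(hits)] if hits else 'Other'  (the index is always in range 0..4)
  match PySem.List.min? hits (fun x => x) with
  | some p => (PySem.List.pyGet? pvCategories p).getD ""
  | none => "Other"

-- ===== PRECONDITION & SPEC =====
def Spec_simplify_anatomy (name : String) (out : String) : Prop := out = simplify_anatomy_alt name
instance (name : String) (out : String) : Decidable (Spec_simplify_anatomy name out) := by unfold Spec_simplify_anatomy; infer_instance

-- ===== CLAIM (what is proved, stated in full; the proofs are below) =====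
def Claim_equal_simplify_anatomy : Prop := ∀ (name : String), Dom_simplify_anatomy name → Spec_simplify_anatomy name (simplify_anatomy name)

-- ===== LEMMAS AND PROOFS =====

-- filter as an append of singleton ifs (so the containment booleans can be abstracted)
theorem pvFilterCons {α : Type} (p : α → Bool) (x : α) (l : List α) :
    List.filter p (x :: l) = (if p x then [x] else []) ++ List.filter p l := by
  simp only [List.filter_cons]; split <;> simp

-- both sides as a function of the 11 keyword-containment booleans: checked over all 2^11 cases
set_option maxHeartbeats 2000000 in
theorem pvBoolKey (b1 b2 b3 b4 b5 b6 b7 b8 b9 b10 b11 : Bool) :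
    (if b1 = true then "Testis"
      else if b2 = true then "Nervous system"
      else if (b3 || b4) = true then "Musculature"
      else if (b5 || b6) = true then "Digestive system"
      else if (b7 || (b8 || (b9 || (b10 || (b11 || false))))) = true then "Developmental stage"
      else "Other")
    = (match PySem.List.min?
          (List.map Prod.snd (if b1 = true then [(("male" : String), (0 : Int))] else []) ++
            (List.map Prod.snd (if b2 = true then [(("nervous" : String), (1 : Int))] else []) ++
              (List.map Prod.snd (if b3 = true then [(("musculature" : String), (2 : Int))] else []) ++
                (List.map Prod.snd (if b4 = true then [(("muscle" : String), (2 : Int))] else []) ++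
                  (List.map Prod.snd (if b5 = true then [(("digestive" : String), (3 : Int))] else []) ++
                    (List.map Prod.snd (if b6 = true then [(("gut" : String), (3 : Int))] else []) ++
                      (List.map Prod.snd (if b7 = true then [(("embryo" : String), (4 : Int))] else []) ++
                        (List.map Prod.snd (if b8 = true then [(("larva" : String), (4 : Int))] else []) ++
                          (List.map Prod.snd (if b9 = true then [(("neurula" : String), (4 : Int))] else []) ++
                            (List.map Prod.snd (if b10 = true then [(("blastula" : String), (4 : Int))] else []) ++
                              List.map Prod.snd (if b11 = true then [(("gastrula" : String), (4 : Int))] else [])))))))))))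
          (fun x => x) with
       | some p => (PySem.List.pyGet? pvCategories p).getD ""
       | none => "Other") := by
  revert b1 b2 b3 b4 b5 b6 b7 b8 b9 b10 b11
  decide

set_option maxHeartbeats 4000000 in
theorem simplify_anatomy_eq_alt (name : String) :
    simplify_anatomy name = simplify_anatomy_alt name := by
  unfold simplify_anatomy simplify_anatomy_alt pvKeywordPriority
  simp only [List.any, pvFilterCons, List.filter_nil, List.map_append, List.append_nil]
  exact pvBoolKey _ _ _ _ _ _ _ _ _ _ _

-- ===== VERDICT (by name: the statement is the Claim_ definition above) =====
theorem simplify_anatomy_spec : Claim_equal_simplify_anatomy := by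
  intro name _
  exact simplify_anatomy_eq_alt name
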